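-- pv_equiv track=rewrite | github.com/alumnos-ingcom/C2-TP5-grupo-3 | tp5ej6.py | balanceo_interno
-- ===== SOURCE A (Python) =====
-- def balanceo_interno(texto, caracter_open, caracter_close, i=0):
--     #Si el string es vacio, retorno '0'
--     if(texto == ""):
--         return 0
--     #Sino aumento 'i' y hago que 'j' valga lo que devuelva 'balanceo_interno' con el string sin su primer caracter
--     i+=1
--     j = balanceo_interno(texto[i:], caracter_open, caracter_close)
--     #Ahora que está "volviendo" debo comparar lo que tenía respecto de lo que tengo en este momento en la primera posición del string
--
--     #Logica interna:
--     # +Solo hay 3 opciones para 'texto[0]':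
--     #    a) es el caracter de apertura == "apertura"
--     #    b) es el caracter de cierre   == "cierre"
--     #    c) es un caracter cualquiera  == "cualquiera"
--     # +Y solo hay 3 opciones para 'j':
--     #    1) es mayor a 0 == "aun puede ser balanceado"
--     #    2) es menor a 0 == "ya no puede ser balanceado"
--     #    3) es igual a 0 == "está balanceado"
--     #
--     # entonces:
--     #  si tengo apertura y "está balanceado"       ==> devuelvo que "ya no puede balancearse esta apertura"                 ==> "j-1"
--     #  si tengo apertura y "aun puede balancearse" ==> devuelvo que "gasté un cierre, esto se balancea o aun puedo hacerlo" ==> "j-1"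
--     #  si tengo cierre y "está balanceado"         ==> devuelvo que "hay un cierre pero aun podría balancearse"             ==> "j+1"
--     #  si tengo cierre y "aun puede balancearse"   ==> devuelvo que "hay un cierre mas pero bueno aun podría balancearse"   ==> "j+1"
--     #  si es un caracter cualquiera                ==> no afecta y devuelvo lo que tenía                                    ==> "j"
--     #  si "ya no puede balancearse"                ==> devuelvo lo que tenía ("seguirá sin poder ser balanceado")           ==> "j"
--     #
--
--     if(texto[0] == caracter_open):
--         if(j >= 0):
--             return j-1
--         else:
--             return j
--     if(texto[0] == caracter_close):
--         if(j >= 0):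
--             return j+1
--         else:
--             return j
--     return j
-- ===== SOURCE B (Python) =====
-- def _fold(j, ch, caracter_open, caracter_close):
--     # One character's effect on the running balance (closers count up, openers
--     # spend a closer; once the score is negative it can never recover).
--     if j >= 0:
--         if ch == caracter_open:
--             return j - 1
--         if ch == caracter_close:
--             return j + 1
--     return j
--
--
-- def balanceo_interno(texto, caracter_open, caracter_close, i=0):
--     """Balance score of the leading character followed by the suffix texto[i+1:]
--     (the whole string when i == 0), accumulated right to left in one pass."""
--     if not texto:
--         return 0
--     j = 0
--     for ch in reversed(texto[i+1:]):
--         j = _fold(j, ch, caracter_open, caracter_close)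
--     return _fold(j, texto[0], caracter_open, caracter_close)
-- ===== Notes on version B (the rewrite author's own statement) =====
-- stated objective: faster
-- what changed: Replaced A's recursion that re-slices the string at every level with a single right-to-left loop maintaining a running balance, folding in the leading character last.
import Mathlib
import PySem

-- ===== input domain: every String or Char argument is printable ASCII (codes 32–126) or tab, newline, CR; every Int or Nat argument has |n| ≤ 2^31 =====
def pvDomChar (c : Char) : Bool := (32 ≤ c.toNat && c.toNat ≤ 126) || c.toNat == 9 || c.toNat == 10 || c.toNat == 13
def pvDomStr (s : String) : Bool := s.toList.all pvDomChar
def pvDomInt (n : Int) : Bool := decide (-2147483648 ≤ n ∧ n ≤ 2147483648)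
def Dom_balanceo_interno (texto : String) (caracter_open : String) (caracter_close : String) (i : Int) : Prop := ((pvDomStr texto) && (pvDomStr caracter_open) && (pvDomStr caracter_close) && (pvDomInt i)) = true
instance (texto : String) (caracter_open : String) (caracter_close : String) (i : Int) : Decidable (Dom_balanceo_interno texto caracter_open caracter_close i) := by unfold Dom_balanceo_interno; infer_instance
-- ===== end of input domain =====

-- B replaces A's recursion that re-slices the string at every level with a single
-- right-to-left loop maintaining a running balance; return values are identical on all inputs.

-- ===== PORT A =====
-- A's branch block after the recursive call (texto[0] vs caracter_open / caracter_close, j from the recursion).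
def pvCombine (caracter_open caracter_close : String) (c : Char) (j : Int) : Int :=
  if String.mk [c] == caracter_open then (if j ≥ 0 then j - 1 else j)
  else if String.mk [c] == caracter_close then (if j ≥ 0 then j + 1 else j)
  else j

-- A's recursive calls all pass i = 0, so they recurse on texto[1:] = the tail; this helper is that recursion.
def balanceo_interno_go (l : List Char) (caracter_open caracter_close : String) : Int :=
  match l with
  | [] => 0                        -- texto == "" → 0
  | c :: rest => pvCombine caracter_open caracter_close c (balanceo_interno_go rest caracter_open caracter_close)

def balanceo_interno (texto : String) (caracter_open : String) (caracter_close : String) (i : Int) : Int :=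
  match texto.toList with
  | [] => 0                        -- texto == ""
  | c :: _ =>                      -- j = balanceo_interno(texto[i+1:], ...) (i was incremented); then the branch block on texto[0]
    pvCombine caracter_open caracter_close c
      (balanceo_interno_go (PySem.List.slice texto.toList (some (i + 1)) none) caracter_open caracter_close)

-- ===== PORT B =====
-- Source B's _fold: one character's effect on the running balance.
def pvFold (j : Int) (c : Char) (caracter_open caracter_close : String) : Int :=
  if j ≥ 0 then
    if String.mk [c] == caracter_open then j - 1
    else if String.mk [c] == caracter_close then j + 1
    else j
  else j

def balanceo_interno_alt (texto : String) (caracter_open : String) (caracter_close : String) (i : Int) : Int :=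
  match texto.toList with
  | [] => 0                        -- if not texto: return 0
  | c :: _ =>                      -- loop over reversed(texto[i+1:]), then fold in texto[0]
    pvFold
      ((PySem.List.slice texto.toList (some (i + 1)) none).reverse.foldl
        (fun j ch => pvFold j ch caracter_open caracter_close) 0)
      c caracter_open caracter_close

-- ===== PRECONDITION & SPEC =====
def Spec_balanceo_interno (texto : String) (caracter_open : String) (caracter_close : String) (i : Int) (out : Int) : Prop := out = balanceo_interno_alt texto caracter_open caracter_close i
instance (texto : String) (caracter_open : String) (caracter_close : String) (i : Int) (out : Int) : Decidable (Spec_balanceo_interno texto caracter_open caracter_close i out) := by unfold Spec_balanceo_interno; infer_instance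

-- ===== CLAIM =====
def Claim_equal_balanceo_interno : Prop := ∀ (texto : String) (caracter_open : String) (caracter_close : String) (i : Int), Dom_balanceo_interno texto caracter_open caracter_close i → Spec_balanceo_interno texto caracter_open caracter_close i (balanceo_interno texto caracter_open caracter_close i)

-- ===== LEMMAS AND PROOFS =====

theorem pvFold_eq_combine (co cc : String) (c : Char) (j : Int) :
    pvFold j c co cc = pvCombine co cc c j := by
  unfold pvFold pvCombine
  split_ifs <;> rfl

theorem foldl_fold_eq_go (co cc : String) (l : List Char) :
    l.reverse.foldl (fun j ch => pvCombine co cc ch j) 0 = balanceo_interno_go l co cc := by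
  induction l with
  | nil => rfl
  | cons c rest ih =>
    rw [List.reverse_cons, List.foldl_append, ih]
    simp [balanceo_interno_go]

-- ===== VERDICT =====
theorem balanceo_interno_spec : Claim_equal_balanceo_interno := by
  intro texto co cc i _
  unfold Spec_balanceo_interno balanceo_interno balanceo_interno_alt
  rcases texto.toList with _ | ⟨c, rest⟩
  · rfl
  · simp only [pvFold_eq_combine]
    rw [foldl_fold_eq_go]
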